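-- pv_equiv track=rewrite | github.com/munkhdorj-m/11th-Python-Exam-1 | assignment.py | second_last_is_five
-- ===== SOURCE A (Python) =====
-- def second_last_is_five(num):
--     num = abs(num)
--     s = str(num)
--
--     if len(s) < 2:
--         return False
--
--     # loop to find the second last index
--     for i in range(len(s)):
--         if i == len(s) - 2:
--             return s[i] == '5'
-- ===== SOURCE B (Python) =====
-- def second_last_is_five(num):
--     n = abs(num)
--     if n < 10:
--         return False
--     return n // 10 % 10 == 5
-- ===== Notes on version B (the rewrite author's own statement) =====
-- stated objective: simpler
-- what changed: Replaces the string conversion and index-scanning loop by pure integer arithmetic: the second-to-last digit is read off with floor division and modulo, and single-digit absolute values give False exactly as A's length guard does.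
import Mathlib
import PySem

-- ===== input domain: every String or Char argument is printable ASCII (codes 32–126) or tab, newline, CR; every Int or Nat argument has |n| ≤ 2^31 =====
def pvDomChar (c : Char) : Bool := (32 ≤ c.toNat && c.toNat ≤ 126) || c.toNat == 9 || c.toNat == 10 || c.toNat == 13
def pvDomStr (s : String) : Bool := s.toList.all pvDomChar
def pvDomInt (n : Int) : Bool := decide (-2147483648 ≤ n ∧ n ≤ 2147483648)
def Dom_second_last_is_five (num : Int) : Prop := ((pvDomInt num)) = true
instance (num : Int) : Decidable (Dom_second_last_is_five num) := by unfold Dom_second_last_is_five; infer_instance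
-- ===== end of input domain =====

-- B replaces A's string conversion and index-scanning loop by integer arithmetic (abs(num) // 10 % 10 == 5); objective: simpler.

-- ===== PORT A =====
-- the for-loop: scans i = 0,1,…; at i = len(s)-2 returns s[i] == '5'.
-- The [] case corresponds to Python falling off the loop (returning None); it is
-- unreachable because the loop is only entered when len(s) ≥ 2.
def slifLoop (s : String) : List Int → Bool
  | [] => false
  | i :: rest =>
    if i = PySem.Str.len s - 2 then PySem.Str.pyGet? s i == some '5'
    else slifLoop s rest

def second_last_is_five (num : Int) : Bool :=
  let num' := |num|
  let s := PySem.Int.toStr num'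
  if PySem.Str.len s < 2 then false
  else slifLoop s (PySem.List.pyRange 0 (PySem.Str.len s) 1)

-- ===== PORT B =====
def second_last_is_five_alt (num : Int) : Bool :=
  let n := |num|
  if n < 10 then false
  else PySem.Int.mod (PySem.Int.floordiv n 10) 10 == 5

-- ===== PRECONDITION & SPEC =====
def Spec_second_last_is_five (num : Int) (out : Bool) : Prop := out = second_last_is_five_alt num
instance (num : Int) (out : Bool) : Decidable (Spec_second_last_is_five num out) := by unfold Spec_second_last_is_five; infer_instance

-- ===== CLAIM (what is proved, stated in full; the proofs are below) =====
def Claim_equal_second_last_is_five : Prop := ∀ (num : Int), Dom_second_last_is_five num → Spec_second_last_is_five num (second_last_is_five num)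

-- ===== LEMMAS AND PROOFS =====

-- toDigitsCore prepends its result to the accumulator
theorem toDigitsCore_acc (fuel : Nat) : ∀ (n : Nat) (acc : List Char),
    Nat.toDigitsCore 10 fuel n acc = Nat.toDigitsCore 10 fuel n [] ++ acc := by
  induction fuel with
  | zero => intro n acc; simp [Nat.toDigitsCore]
  | succ f ih =>
    intro n acc
    simp only [Nat.toDigitsCore]
    by_cases h : n / 10 = 0
    · simp [h]
    · simp only [h, if_false]
      rw [ih (n / 10) ((n % 10).digitChar :: acc), ih (n / 10) [(n % 10).digitChar]]
      simp

-- fuel independence above the value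
theorem toDigitsCore_fuel : ∀ (f₁ f₂ n : Nat), n < f₁ → n < f₂ →
    Nat.toDigitsCore 10 f₁ n [] = Nat.toDigitsCore 10 f₂ n [] := by
  intro f₁
  induction f₁ with
  | zero => intro f₂ n h; omega
  | succ f ih =>
    intro f₂ n h1 h2
    cases f₂ with
    | zero => omega
    | succ g =>
      simp only [Nat.toDigitsCore]
      by_cases h : n / 10 = 0
      · simp [h]
      · simp only [h, if_false]
        rw [toDigitsCore_acc f, toDigitsCore_acc g]
        have hn : 0 < n := by
          by_contra hc
          simp [Nat.eq_zero_of_not_pos hc] at h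
        have hlt : n / 10 < n := Nat.div_lt_self hn (by norm_num)
        rw [ih g (n / 10) (by omega) (by omega)]

-- small numbers: a single digit character
theorem toDigits_lt_ten (n : Nat) (h : n < 10) :
    Nat.toDigits 10 n = [Nat.digitChar n] := by
  unfold Nat.toDigits
  simp only [Nat.toDigitsCore]
  have : n / 10 = 0 := Nat.div_eq_of_lt h
  simp [this, Nat.mod_eq_of_lt h]

-- the decomposition: peel off the last digit
theorem toDigits_decomp (n : Nat) (h : 10 ≤ n) :
    Nat.toDigits 10 n = Nat.toDigits 10 (n / 10) ++ [Nat.digitChar (n % 10)] := by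
  unfold Nat.toDigits
  conv_lhs => rw [Nat.toDigitsCore]
  have h0 : ¬ (n / 10 = 0) := by
    have := Nat.div_le_div_right (c := 10) h
    simp at this; omega
  simp only [h0, if_false]
  rw [toDigitsCore_acc]
  have hlt : n / 10 < n := Nat.div_lt_self (by omega) (by norm_num)
  rw [toDigitsCore_fuel n (n / 10 + 1) (n / 10) hlt (Nat.lt_succ_self _)]

-- last character is the last digit
theorem toDigits_getLast? (n : Nat) :
    (Nat.toDigits 10 n).getLast? = some (Nat.digitChar (n % 10)) := by
  by_cases h : n < 10
  · rw [toDigits_lt_ten n h, Nat.mod_eq_of_lt h]; rfl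
  · rw [toDigits_decomp n (by omega)]; simp

theorem toDigits_ne_nil (n : Nat) : Nat.toDigits 10 n ≠ [] := by
  by_cases h : n < 10
  · rw [toDigits_lt_ten n h]; simp
  · rw [toDigits_decomp n (by omega)]; simp

-- the loop returns the comparison at the first index equal to the target
theorem slifLoop_eval (s : String) : ∀ (idxs : List Int),
    (PySem.Str.len s - 2) ∈ idxs →
    slifLoop s idxs = (PySem.Str.pyGet? s (PySem.Str.len s - 2) == some '5') := by
  intro idxs
  induction idxs with
  | nil => simp
  | cons i rest ih =>
    intro hmem
    simp only [slifLoop]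
    by_cases h : i = PySem.Str.len s - 2
    · subst h; simp
    · simp only [h, if_false]
      apply ih
      rcases List.mem_cons.mp hmem with h' | h'
      · exact absurd h'.symm h
      · exact h'

theorem digitChar_eq_five_iff (d : Nat) (hd : d < 10) :
    (Nat.digitChar d = '5') ↔ d = 5 := by
  interval_cases d <;> simp [Nat.digitChar]

-- ===== VERDICT (by name: the statement is the Claim_ definition above) =====
theorem second_last_is_five_spec : Claim_equal_second_last_is_five := by
  intro num _
  unfold Spec_second_last_is_five second_last_is_five second_last_is_five_alt
  set n : Nat := num.natAbs with hn
  have habs : |num| = (n : Int) := Int.abs_eq_natAbs num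
  rw [habs]
  have hchars : (PySem.Int.toStr (n : Int)).toList = Nat.toDigits 10 n := by
    simp [PySem.Int.toStr, PySem.Int.toChars]
  have hlen : PySem.Str.len (PySem.Int.toStr (n : Int)) =
      ((Nat.toDigits 10 n).length : Int) := by
    rw [PySem.Str.len_eq, hchars]
  by_cases h : n < 10
  · -- single digit: both sides are false
    have hdig := toDigits_lt_ten n h
    have hlt : ((n : Int)) < 10 := by exact_mod_cast h
    rw [if_pos (by rw [hlen, hdig]; simp), if_pos hlt]
  · -- n ≥ 10
    have h10 : 10 ≤ n := by omega
    have hdec := toDigits_decomp n h10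
    have hpre_ne := toDigits_ne_nil (n / 10)
    have hLlen : (Nat.toDigits 10 n).length = (Nat.toDigits 10 (n / 10)).length + 1 := by
      rw [hdec]; simp
    have hge1 : 1 ≤ (Nat.toDigits 10 (n / 10)).length := List.length_pos_iff.mpr hpre_ne
    rw [if_neg (by rw [hlen]; omega),
        if_neg (by omega)]
    -- evaluate A's loop
    set s := PySem.Int.toStr (n : Int) with hs
    have hmem : PySem.Str.len s - 2 ∈ PySem.List.pyRange 0 (PySem.Str.len s) 1 := by
      rw [PySem.List.mem_pyRange_one, hlen]
      omega
    rw [slifLoop_eval s _ hmem]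
    -- the indexed character
    have hidx : PySem.Str.pyGet? s (PySem.Str.len s - 2) =
        some (Nat.digitChar ((n / 10) % 10)) := by
      rw [PySem.Str.pyGet?_eq, hlen, hchars, hdec]
      have hL : ((Nat.toDigits 10 (n/10) ++ [Nat.digitChar (n % 10)]).length : Int) - 2 =
          (((Nat.toDigits 10 (n/10)).length - 1 : Nat) : Int) := by
        simp; omega
      rw [hL]
      simp only [PySem.Chars.pyGet?_eq_listPyGet?, PySem.List.pyGet?_natCast]
      rw [List.getElem?_append_left (by omega)]
      have := toDigits_getLast? (n / 10)
      rwa [List.getLast?_eq_getElem?] at this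
    rw [hidx]
    -- B's arithmetic
    have hfd : PySem.Int.floordiv (n : Int) 10 = ((n / 10 : Nat) : Int) := by
      exact_mod_cast PySem.Int.floordiv_natCast n 10
    have hmd : PySem.Int.mod ((n / 10 : Nat) : Int) 10 = (((n / 10) % 10 : Nat) : Int) := by
      exact_mod_cast PySem.Int.mod_natCast (n / 10) 10
    rw [hfd, hmd]
    have hd10 : (n / 10) % 10 < 10 := Nat.mod_lt _ (by norm_num)
    by_cases h5 : (n / 10) % 10 = 5
    · rw [h5]; decide
    · have hchar : Nat.digitChar ((n / 10) % 10) ≠ '5' :=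
        fun hc => h5 ((digitChar_eq_five_iff _ hd10).mp hc)
      simp [hchar]
      omega
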